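-- pv_equiv track=rewrite | github.com/nzkim1234/Algorithm | Programmers/숫자_게임.py | solution
-- ===== SOURCE A (Python) =====
-- def solution(A, B):
--     answer = 0
--     A.sort(reverse = True)
--     B.sort()
--
--     # B[j] 값이 i보다 클경우 B[j]를 삭제
--     for i in A:
--         for j in range(len(B) - 1, -1, -1):
--             if B[j] > i:
--                 answer += 1
--                 B.pop()
--                 break
--
--     return answer
-- ===== SOURCE B (Python) =====
-- def solution(A, B):
--     # Dual greedy: walk B's values in ASCENDING order and match each against the
--     # smallest still-unmatched A value; equivalent to A's largest-first greedy
--     # (both compute the maximum number of pairs (a, b) with b > a).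
--     # Does not mutate its arguments (A sorts them in place).
--     a = sorted(A)
--     j = 0
--     for b in sorted(B):
--         if j < len(a) and b > a[j]:
--             j += 1
--     return j
-- ===== Notes on version B (the rewrite author's own statement) =====
-- stated objective: faster
-- what changed: Replaces A's largest-first greedy (for each A value descending, scan B backwards and pop the largest B) by the dual smallest-first greedy: a single index-pointer pass over B ascending matching each B value against the smallest unmatched A value; equality of the two greedies (both compute the maximum matching with b > a) is proved in Lean.
import Mathlib
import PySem

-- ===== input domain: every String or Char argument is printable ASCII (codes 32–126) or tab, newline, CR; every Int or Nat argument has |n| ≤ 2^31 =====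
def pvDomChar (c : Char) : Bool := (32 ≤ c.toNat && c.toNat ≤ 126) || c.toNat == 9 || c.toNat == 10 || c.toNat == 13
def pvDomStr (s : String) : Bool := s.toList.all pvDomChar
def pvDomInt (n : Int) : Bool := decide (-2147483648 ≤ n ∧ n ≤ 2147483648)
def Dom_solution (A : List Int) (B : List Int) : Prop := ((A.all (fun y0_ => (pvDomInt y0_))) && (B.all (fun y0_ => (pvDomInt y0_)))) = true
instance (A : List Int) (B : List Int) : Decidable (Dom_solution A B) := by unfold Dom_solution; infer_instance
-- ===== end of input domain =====

-- B replaces A's largest-first greedy (scan/pop the largest B for each A value descending)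
-- by the dual smallest-first greedy: one index pass over B ascending against the smallest
-- unmatched A value (faster). A sorts both arguments in place and pops from B; the
-- equivalence proved here is about the RETURN value only (B does not mutate its arguments).


-- ===== PORT A =====
-- inner loop: 'for j in range(len(B)-1,-1,-1): if B[j] > i: answer += 1; B.pop(); break'
-- B.pop() pops the last element (= dropLast; B is nonempty whenever the branch fires, since
-- index j is in range). The 'none' case of pyGet? is unreachable (j always in range).
def pvLoopA (B : List Int) (answer : Int) (i : Int) : List Int → List Int × Int
  | [] => (B, answer)
  | j :: rest =>
    match PySem.List.pyGet? B j with
    | some v => if v > i then (B.dropLast, answer + 1) else pvLoopA B answer i rest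
    | none => (B, answer)

def solution (A : List Int) (B : List Int) : Int :=
  let As := PySem.List.sorted A (fun x => x) true
  let B0 := PySem.List.sorted B (fun x => x) false
  let st := As.foldl
    (fun (st : List Int × Int) i =>
      pvLoopA st.1 st.2 i (PySem.List.pyRange ((st.1.length : Int) - 1) (-1) (-1)))
    (B0, 0)
  st.2

-- ===== PORT B =====
-- 'a = sorted(A); j = 0; for b in sorted(B): if j < len(a) and b > a[j]: j += 1; return j'
def solution_alt (A : List Int) (B : List Int) : Int :=
  let a := PySem.List.sorted A (fun x => x) false
  let bs := PySem.List.sorted B (fun x => x) false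
  bs.foldl
    (fun (j : Int) b =>
      if j < (a.length : Int) then
        match PySem.List.pyGet? a j with
        | some x => if b > x then j + 1 else j
        | none => j
      else j) 0

-- ===== PRECONDITION & SPEC =====
def Spec_solution (A : List Int) (B : List Int) (out : Int) : Prop := out = solution_alt A B
instance (A : List Int) (B : List Int) (out : Int) : Decidable (Spec_solution A B out) := by unfold Spec_solution; infer_instance

-- ===== CLAIM (what is proved, stated in full; the proofs are below) =====
def Claim_equal_solution : Prop := ∀ (A : List Int) (B : List Int), Dom_solution A B → Spec_solution A B (solution A B)

-- ===== LEMMAS AND PROOFS =====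

-- A's greedy on both lists sorted DESCENDING, as a recursion (bs is the remaining B pool).
def gRec : List Int → List Int → Int
  | [], _ => 0
  | _ :: as, [] => gRec as []
  | a :: as, b :: bs => if b > a then 1 + gRec as bs else gRec as (b :: bs)

-- B's greedy on both lists sorted ASCENDING (first arg: remaining B, second: unmatched A).
def hRec : List Int → List Int → Int
  | [], _ => 0
  | _ :: bs, [] => hRec bs []
  | b :: bs, a :: as => if b > a then 1 + hRec bs as else hRec bs (a :: as)

theorem gRec_nil_right : ∀ as : List Int, gRec as [] = 0 := by
  intro as; induction as with
  | nil => rfl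
  | cons a as ih => simpa [gRec] using ih

theorem hRec_nil_right : ∀ bs : List Int, hRec bs [] = 0 := by
  intro bs; induction bs with
  | nil => rfl
  | cons b bs ih => simpa [hRec] using ih

-- ===== A-side reduction (pop-scan fold = gRec on descending lists) =====

theorem pvNoMatch (i : Int) : ∀ (idxs : List Int) (l : List Int) (ans : Int),
    (∀ v ∈ l, v ≤ i) → pvLoopA l ans i idxs = (l, ans) := by
  intro idxs
  induction idxs with
  | nil => intro l ans h; rfl
  | cons j rest ih =>
    intro l ans h
    simp only [pvLoopA]
    cases hg : PySem.List.pyGet? l j with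
    | none => rfl
    | some v =>
      dsimp only
      rw [if_neg (not_lt.mpr (h v (PySem.List.mem_of_pyGet?_eq_some l hg)))]
      exact ih l ans h

theorem pvPyRange_down (n : Nat) :
    PySem.List.pyRange ((n : Int) - 1) (-1) (-1) =
      (List.range n).map (fun (k : Nat) => (n : Int) - 1 - (k : Int)) := by
  unfold PySem.List.pyRange
  cases n with
  | zero => simp
  | succ m =>
    have h1 : ((-1:Int) < (m+1:Nat) - 1) := by push_cast; omega
    simp only [if_neg (by norm_num : ¬ ((-1:Int) = 0)), if_neg (by norm_num : ¬ ((0:Int) < -1)), if_pos h1]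
    have h2 : ((((m+1:Nat):Int) - 1 - -1 + - -1 - 1) / - -1).toNat = m+1 := by push_cast; omega
    rw [h2]
    apply List.map_congr_left
    intro k _
    push_cast; ring

theorem pvInner (i ans : Int) (l : List Int) (hl : l.Pairwise (fun a b : Int => a ≤ b)) :
    pvLoopA l ans i (PySem.List.pyRange ((l.length : Int) - 1) (-1) (-1)) =
      match l.reverse with
      | [] => (l, ans)
      | b :: rest => if b > i then (rest.reverse, ans + 1) else (l, ans) := by
  rw [pvPyRange_down]
  cases hrev : l.reverse with
  | nil =>
    have : l = [] := by simpa using congrArg List.reverse hrev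
    subst this; rfl
  | cons b rest =>
    have hl' : l = rest.reverse ++ [b] := by
      have := congrArg List.reverse hrev
      simpa using this
    have hlen : l.length = rest.length + 1 := by rw [hl']; simp
    rw [hlen, List.range_succ_eq_map, List.map_cons]
    simp only [pvLoopA, Nat.cast_zero]
    have hget : PySem.List.pyGet? l ((rest.length + 1 : Nat) - 1 - (0:Int)) = some b := by
      have : ((rest.length + 1 : Nat) : Int) - 1 - 0 = ((rest.reverse.length : Nat) : Int) := by
        push_cast; ring_nf; simp
      rw [this, hl', PySem.List.pyGet?_append_length]
    rw [hget]
    dsimp only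
    by_cases hb : b > i
    · rw [if_pos hb, if_pos hb]
      have : l.dropLast = rest.reverse := by rw [hl']; simp
      rw [this]
    · rw [if_neg hb, if_neg hb]
      apply pvNoMatch
      intro v hv
      rw [hl'] at hl hv
      rcases List.mem_append.mp hv with h1 | h1
      · have : v ≤ b := by
          have := (List.pairwise_append.mp hl).2.2
          exact this v h1 b (by simp)
        omega
      · simp at h1; omega

theorem pvSortedRevEqReverse (xs : List Int) :
    PySem.List.sorted xs (fun x => x) true = (PySem.List.sorted xs (fun x => x) false).reverse := by
  apply List.Perm.eq_of_pairwise (le := fun a b : Int => b ≤ a)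
  · exact fun a b _ _ h1 h2 => le_antisymm h2 h1
  · exact PySem.List.sorted_pairwise_rev xs (fun x => x)
  · exact (List.pairwise_reverse).mpr (PySem.List.sorted_pairwise xs (fun x => x))
  · exact (PySem.List.sorted_perm xs (fun x => x) true).trans
      ((PySem.List.sorted_perm xs (fun x => x) false).symm.trans
        (PySem.List.sorted xs (fun x => x) false).reverse_perm.symm)

-- A's fold (over as, with the remaining-B pool held ASCENDING and popped from the back)
-- counts exactly gRec as (pool reversed), when the pool is sorted ascending.
theorem pvMain (as : List Int) : ∀ (l : List Int) (ans : Int),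
    l.Pairwise (fun a b : Int => a ≤ b) →
    (as.foldl
      (fun (st : List Int × Int) i =>
        pvLoopA st.1 st.2 i (PySem.List.pyRange ((st.1.length : Int) - 1) (-1) (-1)))
      (l, ans)).2 = ans + gRec as l.reverse := by
  induction as with
  | nil => intro l ans _; simp [gRec]
  | cons i as ih =>
    intro l ans hl
    rw [List.foldl_cons]
    rw [pvInner i ans l hl]
    cases hrev : l.reverse with
    | nil =>
      have h0 : l = [] := by simpa using congrArg List.reverse hrev
      subst h0
      simpa [gRec, gRec_nil_right] using ih [] ans List.Pairwise.nil
    | cons b rest =>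
      have hl' : l = rest.reverse ++ [b] := by simpa using congrArg List.reverse hrev
      dsimp only
      by_cases hb : b > i
      · rw [if_pos hb]
        have hp : rest.reverse.Pairwise (fun a b : Int => a ≤ b) := by
          rw [hl'] at hl
          exact (List.pairwise_append.mp hl).1
        have h2 := ih rest.reverse (ans + 1) hp
        rw [h2, List.reverse_reverse]
        simp [gRec, hb]
        ring
      · rw [if_neg hb]
        rw [ih l ans hl, hrev]
        simp [gRec, hb]

-- ===== the combinatorial heart: largest-first greedy = smallest-first greedy =====

-- Appending a b that beats no A element to the back of the (descending) B pool changes nothing.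
theorem pvDropB : ∀ (as : List Int) (bs : List Int) (b : Int),
    (∀ x ∈ as, ¬ b > x) → gRec as (bs ++ [b]) = gRec as bs := by
  intro as
  induction as with
  | nil => intro bs b _; rfl
  | cons a as ih =>
    intro bs b h
    cases bs with
    | nil =>
      have hba : ¬ b > a := h a (by simp)
      simp only [List.nil_append, gRec, if_neg hba]
      have := ih [] b (fun x hx => h x (by simp [hx]))
      simpa [gRec_nil_right] using this
    | cons y bs' =>
      simp only [List.cons_append, gRec]
      by_cases hy : y > a
      · rw [if_pos hy, if_pos hy, ih bs' b (fun x hx => h x (by simp [hx]))]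
      · rw [if_neg hy, if_neg hy]
        exact ih (y :: bs') b (fun x hx => h x (by simp [hx]))

-- If the smallest B (last of the descending pool) beats the smallest A (last of as),
-- the greedy matches exactly one more pair than on the two lists with those two removed.
theorem pvMatchLast : ∀ (as bs : List Int) (a b : Int),
    (bs ++ [b]).Pairwise (fun x y : Int => y ≤ x) → b > a →
    gRec (as ++ [a]) (bs ++ [b]) = 1 + gRec as bs := by
  intro as
  induction as with
  | nil =>
    intro bs a b hs hba
    induction bs with
    | nil => simp [gRec, hba]
    | cons y bs' ihb =>
      have hy : y > a := by
        have : b ≤ y := by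
          have := (List.pairwise_cons.mp hs).1
          exact this b (by simp)
        omega
      simp [gRec, hy]
  | cons x as' ih =>
    intro bs a b hs hba
    cases bs with
    | nil =>
      simp only [List.nil_append] at hs ⊢
      simp only [List.cons_append, gRec]
      by_cases hbx : b > x
      · simp [if_pos hbx, gRec_nil_right]
      · rw [if_neg hbx]
        have := ih [] a b (by simpa using hs) hba
        simp [gRec_nil_right] at this ⊢; exact this
    | cons y bs' =>
      simp only [List.cons_append, gRec]
      by_cases hy : y > x
      · rw [if_pos hy, if_pos hy]
        have := ih bs' a b (List.pairwise_cons.mp hs).2 hba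
        rw [this]
      · rw [if_neg hy, if_neg hy]
        exact ih (y :: bs') a b hs hba

-- Main duality: on ascending α (A values) and ascending β (B values),
-- largest-first greedy (gRec on the reversed lists) = smallest-first greedy (hRec).
theorem pvDual : ∀ (β α : List Int),
    α.Pairwise (fun x y : Int => x ≤ y) → β.Pairwise (fun x y : Int => x ≤ y) →
    gRec α.reverse β.reverse = hRec β α := by
  intro β
  induction β with
  | nil => intro α _ _; simp [gRec_nil_right, hRec]
  | cons b β' ih =>
    intro α hα hβ
    cases α with
    | nil => simp [gRec, hRec_nil_right, hRec]
    | cons a α' =>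
      simp only [List.reverse_cons]
      by_cases hba : b > a
      · rw [pvMatchLast α'.reverse β'.reverse a b
          (by rw [← List.reverse_cons]; exact List.pairwise_reverse.mpr hβ) hba]
        rw [ih α' (List.pairwise_cons.mp hα).2 (List.pairwise_cons.mp hβ).2]
        simp [hRec, hba]
      · rw [pvDropB (α'.reverse ++ [a]) β'.reverse b ?hnb]
        · rw [← List.reverse_cons]
          rw [ih (a :: α') hα (List.pairwise_cons.mp hβ).2]
          simp [hRec, hba]
        · intro x hx
          rcases List.mem_append.mp hx with h1 | h1
          · have hax : a ≤ x := (List.pairwise_cons.mp hα).1 x (by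
              have := List.mem_reverse.mp h1; exact this)
            omega
          · simp at h1; omega

-- ===== B-side reduction (index fold = hRec) =====

theorem pvFoldB (a : List Int) : ∀ (β : List Int) (j : Nat), j ≤ a.length →
    β.foldl
      (fun (j : Int) b =>
        if j < (a.length : Int) then
          match PySem.List.pyGet? a j with
          | some x => if b > x then j + 1 else j
          | none => j
        else j) (j : Int) = (j : Int) + hRec β (a.drop j) := by
  intro β
  induction β with
  | nil => intro j _; simp [hRec]
  | cons b β' ih =>
    intro j hj
    rw [List.foldl_cons]
    by_cases hlt : j < a.length
    · have hget : PySem.List.pyGet? a (j : Int) = some (a.get ⟨j, hlt⟩) := by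
        simp [PySem.List.pyGet?, PySem.List.pyIdx?, hlt]
      have hdrop : a.drop j = a.get ⟨j, hlt⟩ :: a.drop (j + 1) :=
        (List.drop_eq_getElem_cons hlt).trans (by simp)
      rw [if_pos (by exact_mod_cast hlt), hget]
      dsimp only
      have hbx' : a[j] = a.get ⟨j, hlt⟩ := rfl
      by_cases hbx : b > a.get ⟨j, hlt⟩
      · rw [if_pos hbx]
        have hc : ((j : Int) + 1) = ((j + 1 : Nat) : Int) := by push_cast; ring
        rw [hc, ih (j + 1) hlt]
        rw [hdrop]
        simp only [hRec, if_pos hbx]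
        push_cast; ring
      · rw [if_neg hbx, ih j hj, hdrop]
        simp only [hRec, if_neg hbx]
    · have hj' : j = a.length := le_antisymm hj (not_lt.mp hlt)
      rw [if_neg (by exact_mod_cast hlt)]
      rw [ih j hj]
      subst hj'
      simp [hRec]

-- ===== VERDICT (by name: the statement is the Claim_ definition above) =====
theorem solution_spec : Claim_equal_solution := by
  intro A B _
  unfold Spec_solution solution solution_alt
  dsimp only
  have hA := PySem.List.sorted_pairwise A (fun x => x)
  have hB := PySem.List.sorted_pairwise B (fun x => x)
  rw [pvMain _ _ _ hB, pvSortedRevEqReverse A,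
    pvDual (PySem.List.sorted B (fun x => x) false) (PySem.List.sorted A (fun x => x) false) hA hB]
  have := pvFoldB (PySem.List.sorted A (fun x => x) false)
    (PySem.List.sorted B (fun x => x) false) 0 (Nat.zero_le _)
  simpa using this.symm
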